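-- pv_equiv track=rewrite | github.com/alexkm13/scarlet-planner | src/search.py | _section_sort_key
-- ===== SOURCE A (Python) =====
-- def _section_sort_key(section: str) -> tuple[str, int]:
--     """Generate a sort key for section codes (e.g., 'A1' -> ('A', 1), 'B10' -> ('B', 10))."""
--     if not section:
--         return ("", 0)
--
--     prefix = ""
--     num_str = ""
--
--     for char in section:
--         if char.isalpha():
--             if not num_str:  # Still in prefix
--                 prefix += char
--         elif char.isdigit():
--             num_str += char
--
--     num = int(num_str) if num_str else 0
--     return (prefix.upper(), num)
-- ===== SOURCE B (Python) =====
-- def _section_sort_key(section: str) -> tuple[str, int]: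
--     """Generate a sort key for section codes (e.g., 'A1' -> ('A', 1), 'B10' -> ('B', 10))."""
--     idx = next((i for i, c in enumerate(section) if c.isdigit()), len(section))
--     prefix = ''.join(c for c in section[:idx] if c.isalpha()).upper()
--     digits = ''.join(c for c in section if c.isdigit())
--     return (prefix, int(digits) if digits else 0)
-- ===== Notes on version B (the rewrite author's own statement) =====
-- stated objective: simpler
-- what changed: Replaces the single stateful loop with an in-prefix flag by a locate-then-filter decomposition: compute the index of the first digit once, then filter alpha chars before it and digit chars everywhere.
import Mathlib
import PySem

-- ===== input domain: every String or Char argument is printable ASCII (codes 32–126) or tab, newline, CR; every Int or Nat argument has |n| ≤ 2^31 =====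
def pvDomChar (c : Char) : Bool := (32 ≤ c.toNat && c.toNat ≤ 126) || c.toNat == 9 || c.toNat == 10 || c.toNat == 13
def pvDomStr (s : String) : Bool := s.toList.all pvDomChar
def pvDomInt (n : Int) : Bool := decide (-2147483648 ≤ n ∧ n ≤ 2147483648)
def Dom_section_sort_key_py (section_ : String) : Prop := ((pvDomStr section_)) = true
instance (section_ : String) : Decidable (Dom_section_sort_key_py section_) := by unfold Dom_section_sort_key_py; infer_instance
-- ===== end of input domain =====

-- B replaces A's single stateful loop (with an "already saw a digit" flag) by a
-- locate-the-first-digit-then-filter decomposition; objective: simpler.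

-- ===== PORT A =====
-- A's loop body: collect alpha chars while no digit seen yet, collect all digit chars.
def pvStepA (acc : List Char × List Char) (c : Char) : List Char × List Char :=
  if PySem.Chars.isalpha c then
    (if acc.2 = [] then (acc.1 ++ [c], acc.2) else acc)
  else if PySem.Chars.isdigit c then (acc.1, acc.2 ++ [c])
  else acc

def section_sort_key_py (section_ : String) : String × Int :=
  let cs := section_.toList
  if cs = [] then ("", 0)
  else
    let r := cs.foldl pvStepA ([], [])
    -- int(num_str): 'none' is unreachable — num_str is a nonempty string of chars '0'–'9'
    let num : Int := if r.2 ≠ [] then (PySem.Int.ofChars? r.2).getD 0 else 0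
    (String.mk (PySem.Chars.upper r.1), num)

-- ===== PORT B =====
def section_sort_key_py_alt (section_ : String) : String × Int :=
  let cs := section_.toList
  let idx := cs.findIdx (fun c => PySem.Chars.isdigit c)
  let pre := PySem.Chars.upper ((cs.take idx).filter (fun c => PySem.Chars.isalpha c))
  let digits := cs.filter (fun c => PySem.Chars.isdigit c)
  -- int(digits): 'none' is unreachable — digits is a nonempty string of chars '0'–'9'
  let num : Int := if digits ≠ [] then (PySem.Int.ofChars? digits).getD 0 else 0
  (String.mk pre, num)

-- ===== PRECONDITION & SPEC =====
def Spec_section_sort_key_py (section_ : String) (out : String × Int) : Prop := out = section_sort_key_py_alt section_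
instance (section_ : String) (out : String × Int) : Decidable (Spec_section_sort_key_py section_ out) := by unfold Spec_section_sort_key_py; infer_instance

-- ===== CLAIM (what is proved, stated in full; the proofs are below) =====
def Claim_equal_section_sort_key_py : Prop := ∀ (section_ : String), Dom_section_sort_key_py section_ → Spec_section_sort_key_py section_ (section_sort_key_py section_)

-- ===== LEMMAS AND PROOFS =====

theorem isalpha_not_isdigit (c : Char) (h : PySem.Chars.isalpha c = true) :
    PySem.Chars.isdigit c = false := by
  unfold PySem.Chars.isalpha PySem.Chars.isupper PySem.Chars.islower at h
  unfold PySem.Chars.isdigit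
  simp [Char.le_def, UInt32.le_iff_toNat_le] at *
  omega

-- once a digit has been seen (acc.2 ≠ []), the loop only appends further digits
theorem foldl_stepA_nonempty (cs : List Char) (p d : List Char) (hd : d ≠ []) :
    cs.foldl pvStepA (p, d) = (p, d ++ cs.filter (fun c => PySem.Chars.isdigit c)) := by
  induction cs generalizing d with
  | nil => simp
  | cons c rest ih =>
    simp only [List.foldl_cons, pvStepA]
    by_cases ha : PySem.Chars.isalpha c = true
    · rw [isalpha_not_isdigit c ha] at *
      simp [ha, hd, ih d hd, isalpha_not_isdigit c ha]
    · by_cases hdg : PySem.Chars.isdigit c = true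
      · rw [if_neg ha, if_pos hdg, ih (d ++ [c]) (by simp)]
        simp [hdg]
      · rw [if_neg ha, if_neg hdg, ih d hd]
        simp [List.filter_cons, hdg]

-- while no digit has been seen, the loop collects alpha chars up to the first digit
theorem foldl_stepA_empty (cs : List Char) (p : List Char) :
    cs.foldl pvStepA (p, []) =
      (p ++ (cs.take (cs.findIdx (fun c => PySem.Chars.isdigit c))).filter
          (fun c => PySem.Chars.isalpha c),
       cs.filter (fun c => PySem.Chars.isdigit c)) := by
  induction cs generalizing p with
  | nil => simp
  | cons c rest ih =>
    simp only [List.foldl_cons, pvStepA]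
    by_cases ha : PySem.Chars.isalpha c = true
    · have hnd := isalpha_not_isdigit c ha
      simp only [ha, if_true, ih (p ++ [c])]
      rw [List.findIdx_cons]
      simp [hnd, ha]
    · by_cases hdg : PySem.Chars.isdigit c = true
      · rw [if_neg ha, if_pos hdg, (show ([] : List Char) ++ [c] = [c] from rfl),
          foldl_stepA_nonempty rest p [c] (by simp),
          List.findIdx_cons]
        simp [hdg]
      · rw [if_neg ha, if_neg hdg, ih p, List.findIdx_cons]
        simp [hdg, ha]

-- ===== VERDICT (by name: the statement is the Claim_ definition above) =====
theorem section_sort_key_py_spec : Claim_equal_section_sort_key_py := by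
  intro s _
  unfold Spec_section_sort_key_py section_sort_key_py section_sort_key_py_alt
  by_cases h : s.toList = []
  · simp only [h, if_true]
    refine Prod.ext ?_ rfl
    simp [PySem.Chars.upper]
    decide
  · simp only [h, if_false, foldl_stepA_empty s.toList [], List.nil_append]
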